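-- pv_equiv track=rewrite | github.com/akimi-yano/algorithm | mocks/io/mock6.py | get_rooms
-- ===== SOURCE A (Python) =====
-- def get_rooms(arr):
--     max_rooms = 0
--     cur_hour = None
--     cur_subject = None
--     cur_rooms = 0
--     for time,  subject in arr:
--         if time != cur_hour:
--             cur_hour = time
--             cur_subject = subject
--             cur_rooms = 1
--         else:
--             cur_subject = subject
--             cur_rooms += 1
--
--         max_rooms = max(max_rooms, cur_rooms)
--
--     return max_rooms
-- ===== SOURCE B (Python) =====
-- def get_rooms(arr):
--     n = len(arr)
--     cuts = [i for i in range(n) if i == 0 or arr[i][0] != arr[i - 1][0]]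
--     cuts.append(n)
--     return max((b - a for a, b in zip(cuts, cuts[1:])), default=0)
-- ===== Notes on version B (the rewrite author's own statement) =====
-- stated objective: alternative
-- what changed: Replaces A's left-to-right state machine (current hour, subject, running counter, running max) with a staged declarative computation: a filtered range comprehension collects the indices where a new run of equal times begins, n is appended, and the answer is the maximum of adjacent differences of that boundary list.
import Mathlib
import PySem

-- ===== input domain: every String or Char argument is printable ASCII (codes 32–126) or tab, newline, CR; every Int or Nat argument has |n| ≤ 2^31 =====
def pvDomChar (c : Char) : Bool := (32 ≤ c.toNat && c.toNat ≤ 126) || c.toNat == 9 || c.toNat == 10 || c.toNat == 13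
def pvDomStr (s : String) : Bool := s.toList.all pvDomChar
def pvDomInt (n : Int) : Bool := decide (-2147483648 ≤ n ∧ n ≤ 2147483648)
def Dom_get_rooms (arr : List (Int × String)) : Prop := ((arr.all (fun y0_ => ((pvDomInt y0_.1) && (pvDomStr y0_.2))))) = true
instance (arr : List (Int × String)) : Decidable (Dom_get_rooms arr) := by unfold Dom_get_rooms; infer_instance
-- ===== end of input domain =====

-- B replaces A's running-counter state machine by a staged computation: the list of run-start
-- indices (a filtered range) with n appended, then the max of adjacent differences
-- (objective: alternative decomposition, same O(n) cost).

-- ===== PORT A =====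
-- state = (max_rooms, cur_hour, cur_subject, cur_rooms); the loop body mirrors A's two branches
def get_rooms_step (st : Int × Option Int × Option String × Int) (p : Int × String) :
    Int × Option Int × Option String × Int :=
  let maxRooms := st.1
  let curHour := st.2.1
  let curRooms := st.2.2.2
  if some p.1 ≠ curHour then
    (max maxRooms 1, some p.1, some p.2, 1)
  else
    (max maxRooms (curRooms + 1), some p.1, some p.2, curRooms + 1)

def get_rooms (arr : List (Int × String)) : Int :=
  (arr.foldl get_rooms_step (0, none, none, 0)).1

-- ===== PORT B =====
-- the comprehension's condition: i == 0 or arr[i][0] != arr[i-1][0]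
def grP (arr : List (Int × String)) (i : Int) : Bool :=
  (i == 0) || ((PySem.List.pyGet? arr i).map Prod.fst != (PySem.List.pyGet? arr (i - 1)).map Prod.fst)

-- cuts = [i for i in range(n) if i == 0 or arr[i][0] != arr[i - 1][0]]
def grStarts (arr : List (Int × String)) : List Int :=
  (PySem.List.pyRange 0 arr.length 1).filter (grP arr)

def get_rooms_alt (arr : List (Int × String)) : Int :=
  let n : Int := arr.length
  let cuts : List Int := grStarts arr ++ [n]          -- cuts.append(n)
  PySem.List.maxD ((cuts.zip (PySem.List.slice cuts (some 1) none)).map (fun p => p.2 - p.1)) id 0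
    -- max((b - a for a, b in zip(cuts, cuts[1:])), default=0)

-- ===== PRECONDITION & SPEC =====
def Spec_get_rooms (arr : List (Int × String)) (out : Int) : Prop := out = get_rooms_alt arr
instance (arr : List (Int × String)) (out : Int) : Decidable (Spec_get_rooms arr out) := by unfold Spec_get_rooms; infer_instance

-- ===== CLAIM (what is proved, stated in full; the proofs are below) =====
def Claim_equal_get_rooms : Prop := ∀ (arr : List (Int × String)), Dom_get_rooms arr → Spec_get_rooms arr (get_rooms arr)

-- ===== LEMMAS AND PROOFS =====

-- proof-only structural middleman: split off the leading run of time t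
def grSplit (t : Int) : List (Int × String) → Nat × List (Int × String)
  | [] => (0, [])
  | (t', s) :: rest =>
    if t' = t then ((grSplit t rest).1 + 1, (grSplit t rest).2) else (0, (t', s) :: rest)

theorem grSplit_len_le (t : Int) (l : List (Int × String)) : (grSplit t l).2.length ≤ l.length := by
  induction l with
  | nil => simp [grSplit]
  | cons p rest ih =>
    obtain ⟨t', s⟩ := p
    simp only [grSplit]
    split
    · simpa using Nat.le_succ_of_le ih
    · simp

-- proof-only: the list of maximal-run lengths, and the maximum run length
def grRunLens : List (Int × String) → List Int
  | [] => []
  | (t, _) :: rest => (((grSplit t rest).1 : Int) + 1) :: grRunLens (grSplit t rest).2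
termination_by l => l.length
decreasing_by
  have := grSplit_len_le t rest
  simpa using Nat.lt_succ_of_le this

def grRunMax : List (Int × String) → Int
  | [] => 0
  | (t, _) :: rest => max (((grSplit t rest).1 : Int) + 1) (grRunMax (grSplit t rest).2)
termination_by l => l.length
decreasing_by
  have := grSplit_len_le t rest
  simpa using Nat.lt_succ_of_le this

theorem grRunMax_nonneg (l : List (Int × String)) : 0 ≤ grRunMax l := by
  induction l using grRunMax.induct with
  | case1 => simp [grRunMax]
  | case2 t s rest ih =>
    simp only [grRunMax]
    omega

-- ---------- A side: the fold computes grRunMax ----------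
theorem grFoldA (xs : List (Int × String)) :
    ∀ (t : Int) (sub : Option String) (rooms maxR : Int), 0 ≤ rooms → rooms ≤ maxR →
    (xs.foldl get_rooms_step (maxR, some t, sub, rooms)).1 =
      max maxR (max (rooms + ((grSplit t xs).1 : Int)) (grRunMax (grSplit t xs).2)) := by
  induction xs with
  | nil =>
    intro t sub rooms maxR h0 h1
    simp only [List.foldl_nil, grSplit, grRunMax]
    push_cast
    omega
  | cons p rest ih =>
    intro t sub rooms maxR h0 h1
    obtain ⟨t', s⟩ := p
    by_cases ht : t' = t
    · subst ht
      have hstep : get_rooms_step (maxR, some t', sub, rooms) (t', s) =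
          (max maxR (rooms + 1), some t', some s, rooms + 1) := by
        simp [get_rooms_step]
      rw [List.foldl_cons, hstep,
        ih t' (some s) (rooms + 1) (max maxR (rooms + 1)) (by omega) (by omega)]
      simp only [grSplit, if_pos]
      push_cast
      omega
    · have hstep : get_rooms_step (maxR, some t, sub, rooms) (t', s) =
          (max maxR 1, some t', some s, 1) := by
        simp [get_rooms_step, ht]
      rw [List.foldl_cons, hstep,
        ih t' (some s) 1 (max maxR 1) (by omega) (by omega)]
      simp only [grSplit, if_neg ht, grRunMax]
      have := grRunMax_nonneg (grSplit t' rest).2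
      push_cast
      omega

theorem get_rooms_eq_runMax (arr : List (Int × String)) : get_rooms arr = grRunMax arr := by
  cases arr with
  | nil => simp [get_rooms, grRunMax]
  | cons p rest =>
    obtain ⟨t, s⟩ := p
    have hstep : get_rooms_step (0, none, none, 0) (t, s) = (max 0 1, some t, some s, 1) := by
      simp [get_rooms_step]
    have h1 : (max (0:Int) 1) = 1 := by omega
    unfold get_rooms
    rw [List.foldl_cons, hstep, h1, grFoldA rest t (some s) 1 1 (by omega) (by omega)]
    simp only [grRunMax]
    have := grRunMax_nonneg (grSplit t rest).2
    omega

-- ---------- B side: the boundary list, its gaps, and the run lengths ----------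

-- range-level form of grStarts
theorem grStarts_eq (arr : List (Int × String)) :
    grStarts arr = ((List.range arr.length).filter (fun k : Nat => grP arr (k : Int))).map (fun k : Nat => (k : Int)) := by
  unfold grStarts
  rw [PySem.List.pyRange_one, List.filter_map]
  simp only [Int.sub_zero, Int.toNat_natCast, zero_add]
  rfl

theorem grP_cons_succ (x : Int × String) (xs : List (Int × String)) (k : Nat) :
    grP (x :: xs) ((k : Int) + 1) =
      ((PySem.List.pyGet? xs (k : Int)).map Prod.fst != (PySem.List.pyGet? (x :: xs) (k : Int)).map Prod.fst) := by
  unfold grP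
  have h0 : (((k : Int) + 1) == 0) = false := by
    simp only [beq_eq_false_iff_ne, ne_eq]
    omega
  rw [h0, Bool.false_or]
  rw [PySem.List.pyGet?_cons_succ]
  norm_num

theorem grP_shift_succ (x : Int × String) (xs : List (Int × String)) (k : Nat) :
    grP (x :: xs) (((k + 1 : Nat) : Int) + 1) = grP xs ((k + 1 : Nat) : Int) := by
  have h2 := grP_cons_succ x xs (k + 1)
  push_cast at h2 ⊢
  rw [h2, PySem.List.pyGet?_cons_succ]
  unfold grP
  have h0 : (((k : Int) + 1) == 0) = false := by
    simp only [beq_eq_false_iff_ne, ne_eq]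
    omega
  rw [h0, Bool.false_or]
  norm_num

-- prepending one element: 0 is always a start; the later starts are the starts of the tail
-- shifted by one, with the tail's leading start 0 kept iff the time changes at index 1
theorem grFilter_shift (x : Int × String) (xs : List (Int × String)) (m : Nat) :
    (List.range m).filter (fun k : Nat => grP (x :: xs) ((k : Int) + 1)) =
      (if ((PySem.List.pyGet? xs 0).map Prod.fst != some x.1)
       then (List.range m).filter (fun k : Nat => grP xs (k : Int))
       else ((List.range m).filter (fun k : Nat => grP xs (k : Int))).tail) := by
  cases m with
  | zero => simp
  | succ m' =>
    rw [List.range_succ_eq_map, List.filter_cons, List.filter_cons]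
    have hR0 : grP (x :: xs) (((0 : Nat) : Int) + 1) =
        ((PySem.List.pyGet? xs 0).map Prod.fst != some x.1) := by
      rw [grP_cons_succ]
      simp only [Nat.cast_zero, PySem.List.pyGet?_zero_cons]
      norm_num
    have hP0 : grP xs ((0 : Nat) : Int) = true := by
      unfold grP
      norm_num
    have htail : (List.map Nat.succ (List.range m')).filter (fun k : Nat => grP (x :: xs) ((k : Int) + 1)) =
        (List.map Nat.succ (List.range m')).filter (fun k : Nat => grP xs (k : Int)) := by
      rw [List.filter_map, List.filter_map]
      congr 1
      apply List.filter_congr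
      intro k _
      exact grP_shift_succ x xs k
    simp only [Nat.cast_zero] at hR0 hP0 ⊢
    rw [hR0, hP0, htail]
    simp only [if_true]
    split
    · rfl
    · rfl

theorem grStarts_cons (x : Int × String) (xs : List (Int × String)) :
    grStarts (x :: xs) =
      0 :: ((if ((PySem.List.pyGet? xs 0).map Prod.fst != some x.1) then grStarts xs
             else (grStarts xs).tail).map (fun i => i + 1)) := by
  rw [grStarts_eq, grStarts_eq]
  rw [List.length_cons, List.range_succ_eq_map, List.filter_cons]
  have h0 : grP (x :: xs) (((0 : Nat) : Int)) = true := by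
    unfold grP
    norm_num
  rw [h0]
  simp only [if_true]
  rw [List.filter_map, List.map_cons, List.map_map]
  have hpred : ((fun k : Nat => grP (x :: xs) (k : Int)) ∘ Nat.succ) =
      (fun k : Nat => grP (x :: xs) ((k : Int) + 1)) := by
    funext k
    simp only [Function.comp, Nat.succ_eq_add_one]
    norm_cast
  rw [hpred, grFilter_shift]
  congr 1
  split
  · rw [List.map_map]
    apply List.map_congr_left
    intro k _
    simp only [Function.comp]
    push_cast
    ring
  · rw [← List.map_tail, List.map_map]
    apply List.map_congr_left
    intro k _
    simp only [Function.comp]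
    push_cast
    ring

-- gaps of a boundary list
def grGaps (c : List Int) : List Int := (c.zip c.tail).map (fun p => p.2 - p.1)

theorem grGaps_shift (c : List Int) (d : Int) : grGaps (c.map (fun i => i + d)) = grGaps c := by
  unfold grGaps
  rw [← List.map_tail, List.zip_map, List.map_map]
  exact List.map_congr_left (by intro p _; simp [Prod.map])

theorem grGaps_cons2 (a b : Int) (t : List Int) :
    grGaps (a :: b :: t) = (b - a) :: grGaps (b :: t) := rfl

theorem grStarts_nil : grStarts ([] : List (Int × String)) = [] := by
  unfold grStarts
  simp

-- the gaps of (starts ++ [n]) are exactly the run lengths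
theorem grGaps_runLens (arr : List (Int × String)) :
    grGaps (grStarts arr ++ [(arr.length : Int)]) = grRunLens arr := by
  induction arr with
  | nil => simp [grStarts_nil, grGaps, grRunLens]
  | cons x xs ih =>
    obtain ⟨t, s⟩ := x
    rw [grStarts_cons]
    have hlen : (((t, s) :: xs).length : Int) = (xs.length : Int) + 1 := by
      push_cast [List.length_cons]
      ring
    rw [hlen]
    cases xs with
    | nil =>
      simp only [grStarts_nil]
      norm_num [grGaps_cons2, grGaps, grRunLens, grSplit, PySem.List.pyGet?]
    | cons y rest =>
      obtain ⟨ty, sy⟩ := y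
      rw [PySem.List.pyGet?_zero_cons]
      simp only [Option.map_some]
      obtain ⟨S, hshape⟩ : ∃ S, grStarts ((ty, sy) :: rest) = 0 :: S :=
        ⟨_, grStarts_cons _ _⟩
      rw [hshape] at ih
      -- split the end of ih's boundary list
      obtain ⟨w0, W', hW⟩ : ∃ w0 W', S ++ [(((ty, sy) :: rest).length : Int)] = w0 :: W' := by
        cases hSnil : S with
        | nil => subst hSnil; exact ⟨_, _, rfl⟩
        | cons a l => subst hSnil; exact ⟨_, _, rfl⟩
      rw [List.cons_append, hW, grGaps_cons2] at ih
      simp only [sub_zero] at ih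
      by_cases hne : ty = t
      · -- same time: the first run grows by one
        have hq : ((some ((ty, sy) : Int × String).1 != some ((t, s) : Int × String).1)) = false := by
          simp [hne]
        simp only at hq
        simp only [hq, Bool.false_eq_true, if_false, hshape, List.tail_cons]
        have hmapW : S.map (fun i => i + 1) ++ [((((ty, sy) :: rest).length : Int)) + 1] =
            (S ++ [(((ty, sy) :: rest).length : Int)]).map (fun i => i + 1) := by
          rw [List.map_append]
          simp
        rw [List.cons_append, hmapW, hW, List.map_cons, grGaps_cons2]
        have hshiftW : grGaps ((w0 + 1) :: W'.map (fun i => i + 1)) = grGaps (w0 :: W') := by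
          simpa using grGaps_shift (w0 :: W') 1
        rw [show (w0 + 1 - 0) = w0 + 1 by ring, hshiftW]
        -- compare with the run-length lists
        subst hne
        simp only [grRunLens, grSplit, if_pos] at ih ⊢
        injection ih with hw0 hgaps
        rw [hgaps, hw0]
        push_cast
        ring_nf
      · -- time changes at index 1: a fresh run of length 1 starts
        have hq : ((some ((ty, sy) : Int × String).1 != some ((t, s) : Int × String).1)) = true := by
          simp [hne]
        simp only at hq
        simp only [hq, if_true, hshape]
        have hmapW : (0 :: S).map (fun i => i + 1) ++ [((((ty, sy) :: rest).length : Int)) + 1] =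
            ((0 :: S) ++ [(((ty, sy) :: rest).length : Int)]).map (fun i => i + 1) := by
          rw [List.map_append]
          simp
        rw [List.cons_append, hmapW, List.cons_append, hW, List.map_cons, List.map_cons,
          grGaps_cons2]
        have h2 : grGaps ((w0 + 1) :: W'.map (fun i => i + 1)) = grGaps (w0 :: W') := by
          simpa using grGaps_shift (w0 :: W') 1
        rw [grGaps_cons2, h2]
        simp only [grRunLens, grSplit, if_neg hne, ← ih]
        norm_num

-- ---------- max(…, default=0) over the run lengths ----------
theorem grMax?_aux (l : List Int) (a : Int) :
    List.foldl (fun acc x => match acc with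
      | none => some x
      | some m => if id m < id x then some x else some m) (some a) l = some (l.foldl max a) := by
  induction l generalizing a with
  | nil => rfl
  | cons x t ih =>
    simp only [List.foldl_cons]
    have h : (if id a < id x then some x else some a) = some (max a x) := by
      simp only [id]
      split <;> simp [max_def] <;> omega
    rw [h, ih]

theorem grMax?_int (a : Int) (l : List Int) :
    PySem.List.max? (a :: l) id = some (l.foldl max a) := by
  unfold PySem.List.max?
  rw [List.foldl_cons]
  show List.foldl _ (some a) l = _
  convert grMax?_aux l a using 2
  funext acc x
  cases acc <;> simp

theorem grFoldlMax_assoc (l : List Int) (a b : Int) :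
    l.foldl max (max a b) = max a (l.foldl max b) := by
  induction l generalizing b with
  | nil => rfl
  | cons y t ih => rw [List.foldl_cons, List.foldl_cons, max_assoc, ih]

theorem grMaxD_cons (a : Int) (l : List Int) :
    PySem.List.maxD (a :: l) id 0 = l.foldl max a := by
  unfold PySem.List.maxD
  rw [grMax?_int]
  rfl

theorem grMaxD_runLens (arr : List (Int × String)) :
    PySem.List.maxD (grRunLens arr) id 0 = grRunMax arr := by
  induction arr using grRunMax.induct with
  | case1 => simp [grRunLens, grRunMax, PySem.List.maxD, PySem.List.max?]
  | case2 t s rest ih =>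
    simp only [grRunLens, grRunMax]
    rw [grMaxD_cons]
    cases h : grRunLens (grSplit t rest).2 with
    | nil =>
      rw [h] at ih
      simp only [PySem.List.maxD, PySem.List.max?, List.foldl_nil, Option.getD_none] at ih
      rw [List.foldl_nil, ← ih]
      have : (0:Int) ≤ ((grSplit t rest).1 : Int) + 1 := by positivity
      omega
    | cons b tl =>
      rw [h] at ih
      rw [grMaxD_cons] at ih
      rw [List.foldl_cons, grFoldlMax_assoc, ih]

-- ===== VERDICT (by name: the statement is the Claim_ definition above) =====
theorem get_rooms_spec : Claim_equal_get_rooms := by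
  intro arr _
  unfold Spec_get_rooms get_rooms_alt
  simp only [PySem.List.slice_from_one]
  show get_rooms arr = PySem.List.maxD (grGaps (grStarts arr ++ [(arr.length : Int)])) id 0
  rw [grGaps_runLens, grMaxD_runLens, get_rooms_eq_runMax]
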